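-- pv_equiv track=rewrite | github.com/jacron/flac | services/services.py | replace_haakjes
-- ===== SOURCE A (Python) =====
-- def replace_haakjes(s):
--     for ch in ['[', '{']:
--         if ch in s:
--             s = s.replace(ch, '(')
--     for ch in [']', '}']:
--         if ch in s:
--             s = s.replace(ch, ')')
--     return s
-- ===== SOURCE B (Python) =====
-- _TABLE = str.maketrans('[{]}', '(())')
--
--
-- def replace_haakjes(s):
--     return s.translate(_TABLE)
-- ===== Notes on version B (the rewrite author's own statement) =====
-- stated objective: idiomatic
-- what changed: Replaces the four membership-guarded repeated str.replace scans with one precomputed translation table applied in a single traversal via str.translate.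
import Mathlib
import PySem

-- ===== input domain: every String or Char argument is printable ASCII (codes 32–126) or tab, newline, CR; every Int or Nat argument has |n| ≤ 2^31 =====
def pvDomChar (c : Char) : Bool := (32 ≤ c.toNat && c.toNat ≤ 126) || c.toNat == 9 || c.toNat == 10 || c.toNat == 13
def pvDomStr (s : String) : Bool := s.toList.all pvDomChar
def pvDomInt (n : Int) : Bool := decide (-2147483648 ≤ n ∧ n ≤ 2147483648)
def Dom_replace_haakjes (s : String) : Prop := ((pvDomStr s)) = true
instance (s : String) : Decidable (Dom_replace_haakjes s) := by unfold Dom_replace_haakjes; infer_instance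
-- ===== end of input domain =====

-- B replaces A's four membership-guarded repeated .replace scans with one precomputed
-- translation table applied in a single traversal (str.translate); objective: idiomatic.

-- ===== PORT A =====
def replace_haakjes (s : String) : String :=
  let s1 := (["[", "{"] : List String).foldl
    (fun s ch => if PySem.Str.isIn ch s then PySem.Str.replace s ch "(" else s) s
  (["]", "}"] : List String).foldl
    (fun s ch => if PySem.Str.isIn ch s then PySem.Str.replace s ch ")" else s) s1

-- ===== PORT B =====
-- str.maketrans('[{]}', '(())') as an association table (char → char)
def pvTable_replace_haakjes : PySem.Dict Char Char :=
  PySem.Dict.ofList (List.zip "[{]}".toList "(())".toList)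

-- s.translate(table): one pass, each char looked up in the table, kept if absent
def replace_haakjes_alt (s : String) : String :=
  String.ofList (s.toList.map (fun c => PySem.Dict.getD pvTable_replace_haakjes c c))

-- ===== PRECONDITION & SPEC =====
def Spec_replace_haakjes (s : String) (out : String) : Prop := out = replace_haakjes_alt s
instance (s : String) (out : String) : Decidable (Spec_replace_haakjes s out) := by unfold Spec_replace_haakjes; infer_instance

-- ===== CLAIM (what is proved, stated in full; the proofs are below) =====
def Claim_equal_replace_haakjes : Prop := ∀ (s : String), Dom_replace_haakjes s → Spec_replace_haakjes s (replace_haakjes s)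

-- ===== LEMMAS AND PROOFS =====

-- single-character str.replace is a pointwise map
theorem pv_go_single (a b : Char) :
    ∀ (l : List Char) (fuel : Nat) (acc : List Char), l.length ≤ fuel →
      PySem.Chars.replace.go [a] [b] fuel l acc
        = acc.reverse ++ l.map (fun c => if c = a then b else c) := by
  intro l
  induction l with
  | nil =>
    intro fuel acc _
    cases fuel <;> simp [PySem.Chars.replace.go]
  | cons c t ih =>
    intro fuel acc h
    cases fuel with
    | zero => simp at h
    | succ f =>
      by_cases hc : c = a
      · subst hc
        simp only [PySem.Chars.replace.go, List.isPrefixOf, beq_self_eq_true, Bool.true_and]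
        simp [ih f (b :: acc) (by simpa using h)]
      · have hb : (a == c) = false := by simp [Ne.symm hc]
        simp only [PySem.Chars.replace.go, List.isPrefixOf, hb, Bool.false_and]
        simp [ih f (c :: acc) (by simpa using h), hc]

theorem pv_replace_single (a b : Char) (s : List Char) :
    PySem.Chars.replace s [a] [b] = s.map (fun c => if c = a then b else c) := by
  simp [PySem.Chars.replace, pv_go_single a b s s.length [] le_rfl]

-- one guarded step of A equals the unconditional pointwise map
theorem pv_step (a b : Char) (l : List Char) :
    (if PySem.Chars.isIn [a] l then PySem.Chars.replace l [a] [b] else l)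
      = l.map (fun c => if c = a then b else c) := by
  by_cases h : PySem.Chars.isIn [a] l = true
  · simp [h, pv_replace_single]
  · have hmem : a ∉ l := fun hm =>
      ((PySem.Chars.isIn_eq_false_iff [a] l).mp (by simpa using h))
        ((List.singleton_infix_iff a l).mpr hm)
    have hmap : l.map (fun c => if c = a then b else c) = l.map id :=
      List.map_congr_left (fun c hc => by
        have hne : c ≠ a := fun e => hmem (e ▸ hc)
        simp [hne])
    simp [h, hmap]
theorem pv_strStep (ch new : String) (a b : Char) (ha : ch.toList = [a])
    (hb : new.toList = [b]) (t : String) :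
    (if PySem.Str.isIn ch t then PySem.Str.replace t ch new else t).toList
      = t.toList.map (fun c => if c = a then b else c) := by
  rw [← pv_step a b t.toList]
  cases hc : PySem.Chars.isIn [a] t.toList <;>
    simp [PySem.Str.isIn, PySem.Str.replace, ha, hb, hc]

theorem pv_getD_other (c : Char) (h1 : c ≠ '[') (h2 : c ≠ '{') (h3 : c ≠ ']') (h4 : c ≠ '}') :
    PySem.Dict.getD pvTable_replace_haakjes c c = c := by
  simp [pvTable_replace_haakjes, PySem.Dict.getD, PySem.Dict.ofList, PySem.Dict.get?,
    PySem.Dict.empty, PySem.Dict.update, PySem.Dict.insert, List.find?,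
    show ('[' == c) = false by simp [Ne.symm h1],
    show ('{' == c) = false by simp [Ne.symm h2],
    show (']' == c) = false by simp [Ne.symm h3],
    show ('}' == c) = false by simp [Ne.symm h4]]

theorem pv_main (s : String) : replace_haakjes s = replace_haakjes_alt s := by
  apply String.toList_inj.mp
  unfold replace_haakjes replace_haakjes_alt
  simp only [List.foldl]
  rw [pv_strStep "}" ")" '}' ')' (by decide) (by decide),
    pv_strStep "]" ")" ']' ')' (by decide) (by decide),
    pv_strStep "{" "(" '{' '(' (by decide) (by decide),
    pv_strStep "[" "(" '[' '(' (by decide) (by decide)]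
  simp only [List.map_map, String.toList_ofList]
  refine List.map_congr_left (fun c _ => ?_)
  by_cases h1 : c = '['
  · subst h1; decide
  by_cases h2 : c = '{'
  · subst h2; decide
  by_cases h3 : c = ']'
  · subst h3; decide
  by_cases h4 : c = '}'
  · subst h4; decide
  simp [Function.comp, h1, h2, h3, h4, pv_getD_other c h1 h2 h3 h4]

-- ===== VERDICT (by name: the statement is the Claim_ definition above) =====
theorem replace_haakjes_spec : Claim_equal_replace_haakjes := by
  intro s _
  exact pv_main s
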